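-- pv_equiv track=rewrite | github.com/bjarkemoensted/dsa | dsa/data_structures/heap_operations.py | iterate_parent_child_pairs
-- ===== SOURCE A (Python) =====
-- from typing import (
--     Callable,
--     Iterator,
--     Optional,
--     Protocol,
--     Sequence,
--     TypeAlias,
--     TypeVar,
--     runtime_checkable
-- )
--
-- def _left(i: int) -> int:
--     """Given an index, returns the index of its left child in a binary tree"""
--     return 2*i + 1
--
-- def _right(i: int) -> int:
--     """Given an index, returns the index of its right child in a binary tree"""
--     return 2*i + 2
--
-- def iterate_parent_child_pairs(size: int, start_index: int=0) -> Iterator[tuple[int, int]]: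
--     """Iterate over pairs of parent/child indices in a binary heap.
--     size is the length of the list/array holding the values.
--     start_index represents the index at which to start the iteration (defaults to the root
--     node at index 0)"""
--
--     if not (0 <= start_index < size):
--         raise ValueError(f"Iteration must start at indices between 0 and size ({size}). Got {start_index}")
--
--     child_inds = (_left(start_index), _right(start_index))
--     for i in child_inds:
--         if i < size:
--             yield start_index, i
--             yield from iterate_parent_child_pairs(size, i)
-- ===== SOURCE B (Python) =====
-- def iterate_parent_child_pairs(size: int, start_index: int = 0):
--     """Iterate over pairs of parent/child indices in a binary heap, DFS pre-order.
--
--     Explicit-stack re-implementation (no recursion); pushes the right child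
--     before the left so the left subtree is expanded first, matching the
--     recursive pre-order. start_index is validated inside the generator body so
--     the ValueError still raises lazily, when iteration begins."""
--     if not (0 <= start_index < size):
--         raise ValueError(f"Iteration must start at indices between 0 and size ({size}). Got {start_index}")
--     stack = []
--     for child in (2 * start_index + 2, 2 * start_index + 1):
--         if child < size:
--             stack.append((start_index, child))
--     while stack:
--         parent, node = stack.pop()
--         yield parent, node
--         for child in (2 * node + 2, 2 * node + 1):
--             if child < size:
--                 stack.append((node, child))
-- ===== Notes on version B (the rewrite author's own statement) =====
-- stated objective: alternative
-- what changed: Replaces the recursive generator with an explicit LIFO stack loop (push right child before left) that produces the same pre-order parent/child pairs without recursion.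
import Mathlib
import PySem

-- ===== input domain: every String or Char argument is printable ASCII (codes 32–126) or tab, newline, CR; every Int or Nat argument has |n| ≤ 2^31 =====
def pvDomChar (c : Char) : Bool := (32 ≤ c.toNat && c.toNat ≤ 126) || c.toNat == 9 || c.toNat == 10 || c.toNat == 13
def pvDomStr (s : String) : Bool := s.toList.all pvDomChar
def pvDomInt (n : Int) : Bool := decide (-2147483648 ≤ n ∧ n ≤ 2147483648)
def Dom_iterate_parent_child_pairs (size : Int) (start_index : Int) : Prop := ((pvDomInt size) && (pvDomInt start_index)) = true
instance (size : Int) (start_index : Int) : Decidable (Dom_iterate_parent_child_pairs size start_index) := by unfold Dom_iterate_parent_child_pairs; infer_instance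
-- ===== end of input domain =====

-- B differs from A only in decomposition: an explicit-stack DFS loop instead of a recursive
-- generator; same pre-order pair sequence. Return value only (both are generators; no mutation).

-- ===== PORT A =====
-- A's recursive generator: guard 0 ≤ i < size (raise otherwise → Pre_ excludes, port returns []),
-- then for each child index < size, yield (i, child) and recurse into the child.
def iterate_parent_child_pairs (size : Int) (start_index : Int) : List (Int × Int) :=
  if 0 ≤ start_index ∧ start_index < size then
    (if 2 * start_index + 1 < size then
       (start_index, 2 * start_index + 1) :: iterate_parent_child_pairs size (2 * start_index + 1)
     else []) ++
    (if 2 * start_index + 2 < size then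
       (start_index, 2 * start_index + 2) :: iterate_parent_child_pairs size (2 * start_index + 2)
     else [])
  else []
termination_by (size - start_index).toNat
decreasing_by all_goals omega

-- ===== PORT B =====
-- B's while-loop over the explicit stack; the Python list's top (end) is the HEAD of the Lean
-- list, so 'append right then left; pop' becomes 'leftEntry? ++ rightEntry? ++ rest; take head'.
-- The fuel 2 ^ size.toNat only makes the loop total in Lean; it is proved sufficient below.
def pvLoopB (size : Int) : Nat → List (Int × Int) → List (Int × Int)
  | 0, _ => []
  | _, [] => []
  | Nat.succ n, (p, c) :: rest =>
      (p, c) :: pvLoopB size n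
        ((if 2 * c + 1 < size then [(c, 2 * c + 1)] else []) ++
         (if 2 * c + 2 < size then [(c, 2 * c + 2)] else []) ++ rest)

def iterate_parent_child_pairs_alt (size : Int) (start_index : Int) : List (Int × Int) :=
  if 0 ≤ start_index ∧ start_index < size then
    pvLoopB size (2 ^ size.toNat)
      ((if 2 * start_index + 1 < size then [(start_index, 2 * start_index + 1)] else []) ++
       (if 2 * start_index + 2 < size then [(start_index, 2 * start_index + 2)] else []))
  else []

-- ===== PRECONDITION & SPEC =====
-- A raises ValueError exactly when ¬(0 ≤ start_index < size); those inputs are excluded.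
def Pre_iterate_parent_child_pairs (size : Int) (start_index : Int) : Prop :=
  0 ≤ start_index ∧ start_index < size
instance (size : Int) (start_index : Int) : Decidable (Pre_iterate_parent_child_pairs size start_index) := by
  unfold Pre_iterate_parent_child_pairs; infer_instance

def pvWitness_iterate_parent_child_pairs : Int × Int := (10, 1)

def Spec_iterate_parent_child_pairs (size : Int) (start_index : Int) (out : List (Int × Int)) : Prop := out = iterate_parent_child_pairs_alt size start_index
instance (size : Int) (start_index : Int) (out : List (Int × Int)) : Decidable (Spec_iterate_parent_child_pairs size start_index out) := by unfold Spec_iterate_parent_child_pairs; infer_instance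

-- ===== CLAIM (what is proved, stated in full; the proofs are below) =====
def Claim_equal_iterate_parent_child_pairs : Prop := ∀ (size : Int) (start_index : Int), Dom_iterate_parent_child_pairs size start_index → Pre_iterate_parent_child_pairs size start_index → Spec_iterate_parent_child_pairs size start_index (iterate_parent_child_pairs size start_index)

-- ===== LEMMAS AND PROOFS =====

-- A's body at a valid index, with the outer guard discharged (used by both lemmas below).
theorem pairsA_unfold (size i : Int) (h0 : 0 ≤ i) (h1 : i < size) :
    iterate_parent_child_pairs size i =
      (if 2 * i + 1 < size then (i, 2 * i + 1) :: iterate_parent_child_pairs size (2 * i + 1) else []) ++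
      (if 2 * i + 2 < size then (i, 2 * i + 2) :: iterate_parent_child_pairs size (2 * i + 2) else []) := by
  rw [iterate_parent_child_pairs]
  simp [h0, h1]

-- Size bound on A's output: the subtree rooted at i emits fewer than 2^(size-i) pairs.
theorem pairsA_len_bound (size : Int) (i : Int) (hi : 0 ≤ i) :
    (iterate_parent_child_pairs size i).length + 1 ≤ 2 ^ (size - i).toNat := by
  by_cases hlt : i < size
  · rw [pairsA_unfold size i hi hlt]
    by_cases hl : 2 * i + 1 < size
    · have ihl := pairsA_len_bound size (2 * i + 1) (by omega)
      have hml : 2 ^ (size - (2 * i + 1)).toNat ≤ 2 ^ ((size - i).toNat - 1) :=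
        Nat.pow_le_pow_right (by omega) (by omega)
      by_cases hr : 2 * i + 2 < size
      · have ihr := pairsA_len_bound size (2 * i + 2) (by omega)
        have hmr : 2 ^ (size - (2 * i + 2)).toNat ≤ 2 ^ ((size - i).toNat - 2) :=
          Nat.pow_le_pow_right (by omega) (by omega)
        have ht : 2 ≤ (size - i).toNat := by omega
        obtain ⟨k, hk⟩ : ∃ k, (size - i).toNat = k + 2 := ⟨(size - i).toNat - 2, by omega⟩
        have h1 : (1:Nat) ≤ 2 ^ k := Nat.one_le_two_pow
        rw [if_pos hl, if_pos hr]
        rw [hk] at hml hmr ⊢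
        simp only [List.length_append, List.length_cons]
        have e1 : 2 ^ (k + 2) = 2 ^ k * 4 := by ring
        have e2 : 2 ^ (k + 2 - 1) = 2 ^ k * 2 := by
          have : k + 2 - 1 = k + 1 := by omega
          rw [this]; ring
        have e3 : 2 ^ (k + 2 - 2) = 2 ^ k := by
          have : k + 2 - 2 = k := by omega
          rw [this]
        omega
      · have ht : 1 ≤ (size - i).toNat := by omega
        obtain ⟨k, hk⟩ : ∃ k, (size - i).toNat = k + 1 := ⟨(size - i).toNat - 1, by omega⟩
        have hml' : 2 ^ (size - (2 * i + 1)).toNat ≤ 2 ^ k :=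
          Nat.pow_le_pow_right (by omega) (by omega)
        have h1 : (1:Nat) ≤ 2 ^ k := Nat.one_le_two_pow
        rw [if_pos hl, if_neg hr, hk]
        simp only [List.length_append, List.length_cons, List.length_nil]
        have e1 : 2 ^ (k + 1) = 2 ^ k * 2 := by ring
        omega
    · have hr : ¬ (2 * i + 2 < size) := by omega
      simp only [if_neg hl, if_neg hr, List.length_append, List.length_nil]
      exact Nat.one_le_two_pow
  · rw [iterate_parent_child_pairs]
    have : ¬ (0 ≤ i ∧ i < size) := by omega
    simp [this]
    exact Nat.one_le_two_pow
termination_by (size - i).toNat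
decreasing_by all_goals omega

-- Loop invariant: with every stack entry a valid index and enough fuel, the loop emits,
-- for each entry in order, the pair itself followed by A's subtree below its child.
theorem pvLoopB_spec (size : Int) :
    ∀ (n : Nat) (stack : List (Int × Int)),
      (∀ pc ∈ stack, 0 ≤ pc.2 ∧ pc.2 < size) →
      (stack.map (fun pc => (iterate_parent_child_pairs size pc.2).length + 1)).sum ≤ n →
      pvLoopB size n stack =
        stack.flatMap (fun pc => (pc.1, pc.2) :: iterate_parent_child_pairs size pc.2) := by
  intro n
  induction n with
  | zero =>
    intro stack hinv hfuel
    cases stack with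
    | nil => rfl
    | cons hd tl => simp at hfuel
  | succ n ih =>
    intro stack hinv hfuel
    cases stack with
    | nil => rfl
    | cons hd tl =>
      obtain ⟨p, c⟩ := hd
      obtain ⟨hc0, hcs⟩ := hinv (p, c) (List.mem_cons_self ..)
      have key := pairsA_unfold size c hc0 hcs
      show (p, c) :: pvLoopB size n _ = _
      have hinv' : ∀ pc ∈ ((if 2 * c + 1 < size then [(c, 2 * c + 1)] else []) ++
            (if 2 * c + 2 < size then [(c, 2 * c + 2)] else []) ++ tl),
          0 ≤ pc.2 ∧ pc.2 < size := by
        intro pc hm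
        simp only [List.mem_append] at hm
        rcases hm with (hm | hm) | hm
        · split at hm <;> simp_all <;> omega
        · split at hm <;> simp_all <;> omega
        · exact hinv pc (List.mem_cons_of_mem _ hm)
      have hfuel' : (((if 2 * c + 1 < size then [(c, 2 * c + 1)] else []) ++
            (if 2 * c + 2 < size then [(c, 2 * c + 2)] else []) ++ tl).map
              (fun pc => (iterate_parent_child_pairs size pc.2).length + 1)).sum ≤ n := by
        have hlen : (iterate_parent_child_pairs size c).length =
            (((if 2 * c + 1 < size then [(c, 2 * c + 1)] else []) ++
              (if 2 * c + 2 < size then [(c, 2 * c + 2)] else [])).map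
                (fun pc => (iterate_parent_child_pairs size pc.2).length + 1)).sum := by
          rw [key]
          split_ifs <;> simp <;> omega
        simp only [List.map_cons, List.sum_cons] at hfuel
        simp only [List.map_append, List.sum_append] at hlen ⊢
        omega
      rw [ih _ hinv' hfuel']
      have hflat : ((if 2 * c + 1 < size then [(c, 2 * c + 1)] else []) ++
            (if 2 * c + 2 < size then [(c, 2 * c + 2)] else [])).flatMap
              (fun pc => (pc.1, pc.2) :: iterate_parent_child_pairs size pc.2) =
          iterate_parent_child_pairs size c := by
        rw [key]
        split_ifs <;> simp
      simp only [List.flatMap_append, List.flatMap_cons] at *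
      rw [hflat]
      simp

-- ===== VERDICT (by name: the statement is the Claim_ definition above) =====
theorem iterate_parent_child_pairs_spec : Claim_equal_iterate_parent_child_pairs := by
  intro size start_index _ hpre
  obtain ⟨h0, h1⟩ := hpre
  unfold Spec_iterate_parent_child_pairs iterate_parent_child_pairs_alt
  rw [if_pos ⟨h0, h1⟩]
  have key := pairsA_unfold size start_index h0 h1
  have hinv : ∀ pc ∈ ((if 2 * start_index + 1 < size then [(start_index, 2 * start_index + 1)] else []) ++
        (if 2 * start_index + 2 < size then [(start_index, 2 * start_index + 2)] else [])),
      0 ≤ pc.2 ∧ pc.2 < size := by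
    intro pc hm
    simp only [List.mem_append] at hm
    rcases hm with hm | hm <;> (split at hm <;> simp_all <;> omega)
  have hlen : (((if 2 * start_index + 1 < size then [(start_index, 2 * start_index + 1)] else []) ++
        (if 2 * start_index + 2 < size then [(start_index, 2 * start_index + 2)] else [])).map
          (fun pc => (iterate_parent_child_pairs size pc.2).length + 1)).sum =
      (iterate_parent_child_pairs size start_index).length := by
    rw [key]
    split_ifs <;> simp <;> omega
  have hbound := pairsA_len_bound size start_index h0
  have hmono : 2 ^ (size - start_index).toNat ≤ 2 ^ size.toNat :=
    Nat.pow_le_pow_right (by omega) (by omega)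
  rw [pvLoopB_spec size _ _ hinv (by omega)]
  have hflat : ((if 2 * start_index + 1 < size then [(start_index, 2 * start_index + 1)] else []) ++
        (if 2 * start_index + 2 < size then [(start_index, 2 * start_index + 2)] else [])).flatMap
          (fun pc => (pc.1, pc.2) :: iterate_parent_child_pairs size pc.2) =
      iterate_parent_child_pairs size start_index := by
    rw [key]
    split_ifs <;> simp
  rw [hflat]
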